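-- pv_equiv track=rewrite | github.com/Samisaac20/maze-solver | backend/app/algorithms/pso/solver.py | _find_start_goal
-- ===== SOURCE A (Python) =====
-- from typing import Dict, List, Sequence, Tuple
--
-- Grid = Sequence[Sequence[int]]
--
-- Cell = Tuple[int, int]
--
-- def _find_start_goal(maze: Grid) -> Tuple[Cell, Cell]:
--   rows = len(maze)
--   cols = len(maze[0])
--   start = None
--   goal = None
--
--   for r in range(rows):
--     for c in range(cols):
--       if maze[r][c] == 0:
--         start = (r, c)
--         break
--     if start:
--       break
--
--   for r in range(rows - 1, -1, -1):
--     for c in range(cols - 1, -1, -1):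
--       if maze[r][c] == 0:
--         goal = (r, c)
--         break
--     if goal:
--       break
--
--   if start is None or goal is None:
--     raise ValueError("maze must expose at least one open cell for start/goal detection")
--   return start, goal
-- ===== SOURCE B (Python) =====
-- def _find_start_goal(maze):
--   rows = len(maze)
--   cols = len(maze[0])
--   start = None
--   goal = None
--   for r in range(rows):
--     row = maze[r]
--     for c in range(cols):
--       if row[c] == 0:
--         if start is None:
--           start = (r, c)
--         goal = (r, c)
--   if start is None:
--     raise ValueError("maze must expose at least one open cell for start/goal detection")
--   return start, goal
-- ===== Notes on version B (the rewrite author's own statement) =====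
-- stated objective: simpler
-- what changed: Replaces A's two directional scans (forward with break for start, backward with break for goal) by one row-major pass that records the first zero as start and the latest zero as goal.
-- outside the precondition, e.g. on _find_start_goal([[0, 1], [5], [0, 1]]): A returns ((0, 0), (2, 0)), B raises IndexError
import Mathlib
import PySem

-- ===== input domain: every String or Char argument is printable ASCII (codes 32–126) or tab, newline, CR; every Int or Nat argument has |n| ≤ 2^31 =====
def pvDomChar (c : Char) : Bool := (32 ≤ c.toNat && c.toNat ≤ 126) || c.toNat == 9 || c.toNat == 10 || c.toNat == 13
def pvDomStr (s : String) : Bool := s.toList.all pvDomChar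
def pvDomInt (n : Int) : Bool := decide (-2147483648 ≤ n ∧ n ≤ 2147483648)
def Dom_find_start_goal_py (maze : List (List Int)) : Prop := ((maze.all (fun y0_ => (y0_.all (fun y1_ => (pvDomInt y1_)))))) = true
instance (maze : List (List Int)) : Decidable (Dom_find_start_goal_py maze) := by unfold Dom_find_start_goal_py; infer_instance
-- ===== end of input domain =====

-- B replaces A's two directional break-out scans by a single row-major pass tracking both
-- the first and the latest open cell (objective: simpler).

-- ===== PORT A =====
-- inner forward loop: first c in range(cols) with maze[r][c] == 0 (pyGet? none = IndexError, outside Pre_)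
def aInner (row : List Int) (cols : Nat) : Option Nat :=
  (List.range cols).find? (fun c => PySem.List.pyGet? row (c : Int) == some 0)

-- first loop of A: rows forward, break on first zero
def aFwd : List (List Int) → Nat → Nat → Option (Int × Int)
  | [], _, _ => none
  | row :: rest, cols, r =>
    match aInner row cols with
    | some c => some ((r : Int), (c : Int))
    | none => aFwd rest cols (r + 1)

-- inner backward loop: c from cols-1 down to 0
def aInnerB (row : List Int) (cols : Nat) : Option Nat :=
  (List.range cols).reverse.find? (fun c => PySem.List.pyGet? row (c : Int) == some 0)

-- second loop of A: rows backward (given the reversed row list and the top index)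
def aBwd : List (List Int) → Nat → Nat → Option (Int × Int)
  | [], _, _ => none
  | row :: rest, cols, r =>
    match aInnerB row cols with
    | some c => some ((r : Int), (c : Int))
    | none => aBwd rest cols (r - 1)

def find_start_goal_py (maze : List (List Int)) : (Int × Int) × (Int × Int) :=
  let cols := (maze.headD []).length
  match aFwd maze cols 0, aBwd maze.reverse cols (maze.length - 1) with
  | some s, some g => (s, g)
  | _, _ => ((-1, -1), (-1, -1))   -- Python raises ValueError here; excluded by Pre_

-- ===== PORT B =====
-- inner loop of B: scan one row, set start on first zero ever, goal on every zero
def bRow (r : Nat) (row : List Int) (cols : Nat)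
    (st : Option (Int × Int) × Option (Int × Int)) :
    Option (Int × Int) × Option (Int × Int) :=
  (List.range cols).foldl
    (fun st (c : Nat) =>
      if PySem.List.pyGet? row (c : Int) == some 0 then
        (st.1.or (some ((r : Int), (c : Int))), some ((r : Int), (c : Int)))
      else st) st

-- outer loop of B: one forward pass over the rows
def bRows : List (List Int) → Nat → Nat →
    Option (Int × Int) × Option (Int × Int) → Option (Int × Int) × Option (Int × Int)
  | [], _, _, st => st
  | row :: rest, cols, r, st => bRows rest cols (r + 1) (bRow r row cols st)

def find_start_goal_py_alt (maze : List (List Int)) : (Int × Int) × (Int × Int) :=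
  let cols := (maze.headD []).length
  let st := bRows maze cols 0 (none, none)
  match st.1 with
  | some s => (s, st.2.getD ((-1), (-1)))  -- B checks only 'start is None'; goal is some whenever start is
  | none => ((-1, -1), (-1, -1))   -- Python raises ValueError here; excluded by Pre_

-- ===== PRECONDITION & SPEC =====
-- Pre_ excludes inputs where Python A raises: the empty maze and mazes with no zero in the
-- scanned region (ValueError / IndexError), and rows shorter than row 0 (IndexError in almost
-- all cases; the rare ragged maze whose short rows are skipped by A's early breaks still
-- returns in A but is excluded too, since B scans every row — see the claim's cite).
def Pre_find_start_goal_py (maze : List (List Int)) : Prop :=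
  maze ≠ [] ∧
  (∀ row ∈ maze, (maze.headD []).length ≤ row.length) ∧
  (∃ row ∈ maze, ∃ c ∈ List.range (maze.headD []).length, row.getD c 1 = 0)
instance (maze : List (List Int)) : Decidable (Pre_find_start_goal_py maze) := by
  unfold Pre_find_start_goal_py; infer_instance

def pvWitness_find_start_goal_py : List (List Int) := [[1, 1], [1, 0]]

def Spec_find_start_goal_py (maze : List (List Int)) (out : (Int × Int) × (Int × Int)) : Prop := out = find_start_goal_py_alt maze
instance (maze : List (List Int)) (out : (Int × Int) × (Int × Int)) : Decidable (Spec_find_start_goal_py maze out) := by unfold Spec_find_start_goal_py; infer_instance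

-- ===== CLAIM (what is proved, stated in full; the proofs are below) =====
def Claim_equal_find_start_goal_py : Prop := ∀ (maze : List (List Int)), Dom_find_start_goal_py maze → Pre_find_start_goal_py maze → Spec_find_start_goal_py maze (find_start_goal_py maze)

-- ===== LEMMAS AND PROOFS =====

-- a (row, col) pair as the Python tuple of ints
def cell (r c : Nat) : Int × Int := ((r : Int), (c : Int))

-- the zeros of one row (column indices < cols, in increasing order)
def zRow (row : List Int) (cols : Nat) : List Nat :=
  (List.range cols).filter (fun c => PySem.List.pyGet? row (c : Int) == some 0)

-- all zero cells of the grid in row-major order, rows numbered from r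
def Z (cols : Nat) : List (List Int) → Nat → List (Int × Int)
  | [], _ => []
  | row :: rest, r => (zRow row cols).map (cell r) ++ Z cols rest (r + 1)

theorem Z_append (cols : Nat) (xs ys : List (List Int)) (r : Nat) :
    Z cols (xs ++ ys) r = Z cols xs r ++ Z cols ys (r + xs.length) := by
  induction xs generalizing r with
  | nil => simp [Z]
  | cons x xs ih =>
    simp [Z, ih (r + 1), List.append_assoc]
    ring_nf

theorem aInner_eq (row : List Int) (cols : Nat) : aInner row cols = (zRow row cols).head? := by
  simp [aInner, zRow, List.head?_filter]

theorem aInnerB_eq (row : List Int) (cols : Nat) : aInnerB row cols = (zRow row cols).getLast? := by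
  unfold aInnerB zRow
  rw [← List.head?_filter, List.filter_reverse, List.head?_reverse]

theorem aFwd_eq (cols : Nat) (rows : List (List Int)) (r : Nat) :
    aFwd rows cols r = (Z cols rows r).head? := by
  induction rows generalizing r with
  | nil => simp [aFwd, Z]
  | cons row rest ih =>
    simp only [aFwd, Z, aInner_eq, List.head?_append]
    cases h : (zRow row cols).head? with
    | none =>
      cases hz : zRow row cols with
      | nil => simp [ih, Option.or]
      | cons a l => simp [hz] at h
    | some c =>
      cases hz : zRow row cols with
      | nil => simp [hz] at h
      | cons a l =>
        rw [hz] at h; simp at h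
        simp [← h, Option.or, cell]

theorem getLast?_cons_or {α : Type} (x : α) (l : List α) :
    (x :: l).getLast? = l.getLast?.or (some x) := by
  cases l with
  | nil => simp
  | cons y ys =>
    have h : ((y :: ys).getLast?).isSome := by simp [List.getLast?_isSome]
    obtain ⟨v, hv⟩ := Option.isSome_iff_exists.mp h
    simp [List.getLast?_cons_cons, hv]

theorem aBwd_rev (cols : Nat) (l : List (List Int)) (r : Nat)
    (hr : l.length = r + 1) :
    aBwd l cols r = (Z cols l.reverse 0).getLast? := by
  induction l generalizing r with
  | nil => simp at hr
  | cons row rest ih =>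
    have hlen : rest.length = r := by simpa using hr
    rw [List.reverse_cons, Z_append]
    simp only [List.length_reverse, hlen, Nat.zero_add, Z, List.append_nil]
    rw [List.getLast?_append, List.getLast?_map]
    cases hz : (zRow row cols).getLast? with
    | some c => simp [aBwd, aInnerB_eq, hz, Option.or, cell]
    | none =>
      simp only [aBwd, aInnerB_eq, hz, Option.map_none, Option.none_or]
      cases rest with
      | nil =>
        have h0 : r = 0 := by simp at hlen; omega
        subst h0
        simp [aBwd, Z]
      | cons y ys =>
        have hr' : (y :: ys).length = (r - 1) + 1 := by simp at hlen ⊢; omega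
        rw [ih (r - 1) hr']

-- B's inner fold restricted to the zero columns of one row
theorem foldG_eq (r : Nat) (l : List Nat) (st : Option (Int × Int) × Option (Int × Int)) :
    l.foldl (fun st c => (st.1.or (some (cell r c)), some (cell r c))) st =
      (st.1.or ((l.map (cell r)).head?),
       ((l.map (cell r)).getLast?).or st.2) := by
  induction l generalizing st with
  | nil => simp
  | cons c cs ih =>
    simp only [List.foldl_cons, ih, List.map_cons, List.head?_cons, getLast?_cons_or]
    simp

-- B's inner loop over one row
theorem bRow_eq (r : Nat) (row : List Int) (cols : Nat)
    (st : Option (Int × Int) × Option (Int × Int)) :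
    bRow r row cols st =
      (st.1.or (((zRow row cols).map (cell r)).head?),
       (((zRow row cols).map (cell r)).getLast?).or st.2) := by
  unfold bRow zRow
  rw [PySem.List.foldl_if_eq_foldl_filter]
  exact foldG_eq r _ st

-- B's outer loop accumulates head/last of the row-major zero list
theorem bRows_eq (cols : Nat) (rows : List (List Int)) (r : Nat)
    (st : Option (Int × Int) × Option (Int × Int)) :
    bRows rows cols r st = (st.1.or (Z cols rows r).head?, ((Z cols rows r).getLast?).or st.2) := by
  induction rows generalizing r st with
  | nil => simp [bRows, Z]
  | cons row rest ih =>
    simp only [bRows, Z, ih, bRow_eq, List.head?_append, List.getLast?_append,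
      Option.or_assoc]

-- ===== VERDICT (by name: the statement is the Claim_ definition above) =====
theorem find_start_goal_py_spec : Claim_equal_find_start_goal_py := by
  intro maze hdom hpre
  unfold Spec_find_start_goal_py
  obtain ⟨hne, -, -⟩ := hpre
  have hr : maze.reverse.length = (maze.length - 1) + 1 := by
    simp; cases maze with | nil => exact absurd rfl hne | cons a l => simp
  have e := aBwd_rev ((maze.headD []).length) maze.reverse (maze.length - 1) hr
  rw [List.reverse_reverse] at e
  simp only [find_start_goal_py, find_start_goal_py_alt, aFwd_eq, e, bRows_eq,
    Option.none_or, Option.or_none]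
  cases hz : Z ((maze.headD []).length) maze 0 with
  | nil => simp
  | cons a as =>
    have h : ((a :: as).getLast?).isSome := by simp [List.getLast?_isSome]
    obtain ⟨v, hv⟩ := Option.isSome_iff_exists.mp h
    simp [hv]
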